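-- pv_equiv track=rewrite | github.com/JonghyunLEE12/SWEA | 프로그래머스/unrated/133502. 햄버거 만들기/햄버거 만들기.py | solution
-- ===== SOURCE A (Python) =====
-- def solution(ingredient):
--     answer = 0
--     index = 0
--     while index < len(ingredient)-3:                   # 재료가 4개가 필요하기에 index가 리스트 총 길이 -3일때까지만 반복한다.
--         if ingredient[index] == 1:                     # 첫 재료가 빵일때만
--             if ingredient[index:index+4] == [1,2,3,1]: # 4개의 재료가 햄버거 재료 순서와 맞는지 비교
--                 del ingredient[index:index+4]          # 맞으면 해당 요소들 리스트에서 제거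
--                 index = index-3                        # index를 -3 요소에서부터 다시 비교하도록 조정(시간을 줄이는 핵심포인트)
--                 answer += 1                            # 햄버거 카운트
--                 continue                               # 다음줄 index += 1 실행없이 다시 while문 처음부터 진행
--         index += 1                                     # if문에 해당하지 않았으면 다음 index로 +1
--     return answer
-- ===== SOURCE B (Python) =====
-- def solution(ingredient):
--     stack = []
--     answer = 0
--     for x in ingredient:
--         stack.append(x)
--         if stack[-4:] == [1, 2, 3, 1]:
--             del stack[-4:]
--             answer += 1
--     return answer
-- ===== Notes on version B (the rewrite author's own statement) =====
-- stated objective: alternative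
-- what changed: replaces A's destructive scan of the input list (delete each matched [1,2,3,1] slice and back up the index by 3) with a single left-to-right pass pushing ingredients on a stack and popping whenever the top four read 1,2,3,1
-- crash fix: On inputs whose length is 1 or 2 mod 4 and whose longest multiple-of-4 prefix consists entirely of removable burgers, A raises IndexError (after deleting a leading burger it indexes 3 places before the start of the 1-2 leftover items); B returns the burger count. — e.g. on solution([1, 2, 3, 1, 5]): A raises IndexError, B returns 1
import Mathlib
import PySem

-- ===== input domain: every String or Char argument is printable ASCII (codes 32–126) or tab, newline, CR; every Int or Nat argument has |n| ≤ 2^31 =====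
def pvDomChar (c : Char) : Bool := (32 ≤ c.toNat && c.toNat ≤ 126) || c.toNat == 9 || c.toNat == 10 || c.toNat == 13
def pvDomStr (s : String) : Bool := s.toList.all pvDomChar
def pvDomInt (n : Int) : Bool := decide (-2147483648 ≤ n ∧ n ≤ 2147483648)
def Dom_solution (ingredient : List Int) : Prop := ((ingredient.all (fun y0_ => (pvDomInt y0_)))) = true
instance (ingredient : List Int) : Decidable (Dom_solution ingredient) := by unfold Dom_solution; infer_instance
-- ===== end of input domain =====

-- B replaces A's destructive scan (delete each matched [1,2,3,1] slice from the input and back the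
-- index up by 3) with a one-pass push/pop stack; A mutates its argument in place (del), B does not —
-- the equivalence proved here is about the return value only.

-- ===== PORT A =====
-- del lst[a:b] (step 1): keep everything outside the normalized slice (Python slice clamping = PySem.List.clampIdx)
def pvDelSlice (xs : List Int) (a b : Int) : List Int :=
  xs.take (PySem.List.clampIdx xs.length a) ++
    xs.drop (max (PySem.List.clampIdx xs.length a) (PySem.List.clampIdx xs.length b))

-- A's while loop, with a fuel guard making the recursion structural (the fuel 2*len+4 chosen in
-- `solution` is proved sufficient below); `none` = the IndexError A raises at ingredient[index]
-- (excluded by Pre_solution)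
def pvLoopA : Nat → List Int → Int → Int → Option Int
  | 0, _, _, _ => none
  | fuel + 1, lst, index, answer =>
    if index < (lst.length : Int) - 3 then
      match PySem.List.pyGet? lst index with
      | none => none
      | some x =>
        if x = 1 then
          if PySem.List.slice lst (some index) (some (index + 4)) = [1, 2, 3, 1] then
            pvLoopA fuel (pvDelSlice lst index (index + 4)) (index - 3) (answer + 1)
          else pvLoopA fuel lst (index + 1) answer
        else pvLoopA fuel lst (index + 1) answer
    else some answer

def solution (ingredient : List Int) : Int :=
  (pvLoopA (2 * ingredient.length + 4) ingredient 0 0).getD 0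

-- ===== PORT B =====
-- B's loop: stack held most-recent-first, so Python's stack[-4:] == [1,2,3,1] is `take 4 = [1,3,2,1]`
def pvLoopB (stack : List Int) (answer : Int) (rest : List Int) : Int :=
  match rest with
  | [] => answer
  | x :: rest =>
    let st := x :: stack
    if st.take 4 = [1, 3, 2, 1] then pvLoopB (st.drop 4) (answer + 1) rest
    else pvLoopB st answer rest

def solution_alt (ingredient : List Int) : Int := pvLoopB [] 0 ingredient

-- ===== PRECONDITION & SPEC =====
-- One step of burger reduction (push, pop a completed [1,2,3,1]); pvRed (w.take m) is the irreducible
-- residue of the first m ingredients.  Needed because A's crash condition genuinely is "the longest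
-- multiple-of-4 prefix consists entirely of removable burgers": it has no simpler closed form.
def pvStep (st : List Int) (x : Int) : List Int :=
  let st' := x :: st
  if st'.take 4 = [1, 3, 2, 1] then st'.drop 4 else st'

def pvRed (l : List Int) : List Int := l.foldl pvStep []

-- Pre_ excludes exactly the inputs on which A raises IndexError: length ≡ 1 or 2 (mod 4), at least 5,
-- and the longest multiple-of-4 prefix consists entirely of removable burgers (A then deletes a
-- leading burger with only 1-2 items left and its backed-up negative index falls out of range).
def Pre_solution (ingredient : List Int) : Prop :=
  ¬ (5 ≤ ingredient.length ∧
      (ingredient.length % 4 = 1 ∨ ingredient.length % 4 = 2) ∧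
      pvRed (ingredient.take (ingredient.length - ingredient.length % 4)) = [])
instance (ingredient : List Int) : Decidable (Pre_solution ingredient) := by
  unfold Pre_solution; infer_instance

def pvWitness_solution : List Int := [1, 2, 3, 1, 2, 3, 1, 1]

-- On inputs of length ≡ 1 or 2 (mod 4) whose longest multiple-of-4 prefix consists entirely of
-- removable burgers, A raises IndexError; B returns the burger count.
def Raises_solution (ingredient : List Int) : Prop :=
  5 ≤ ingredient.length ∧
    (ingredient.length % 4 = 1 ∨ ingredient.length % 4 = 2) ∧
    pvRed (ingredient.take (ingredient.length - ingredient.length % 4)) = []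
instance (ingredient : List Int) : Decidable (Raises_solution ingredient) := by
  unfold Raises_solution; infer_instance

def pvRaiseWitness_solution : List Int := [1, 2, 3, 1, 5]
def pvRaiseWitnessOut_solution : Int := 1

def Spec_solution (ingredient : List Int) (out : Int) : Prop := out = solution_alt ingredient
instance (ingredient : List Int) (out : Int) : Decidable (Spec_solution ingredient out) := by
  unfold Spec_solution; infer_instance

-- ===== CLAIM (what is proved, stated in full; the proofs are below) =====
def Claim_equal_solution : Prop := ∀ (ingredient : List Int), Dom_solution ingredient →
  Pre_solution ingredient → Spec_solution ingredient (solution ingredient)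

-- Claim_raises_solution is discharged by `solution_raises` at the bottom of the file
def Claim_raises_solution : Prop :=
  (∀ (ingredient : List Int), Dom_solution ingredient → Raises_solution ingredient →
      ¬ Pre_solution ingredient) ∧
    (Dom_solution (pvRaiseWitness_solution) ∧ Raises_solution (pvRaiseWitness_solution) ∧
      solution_alt (pvRaiseWitness_solution) = pvRaiseWitnessOut_solution)

-- ===== LEMMAS AND PROOFS =====

-- A's loop ends as soon as the index reaches len - 3
theorem pvLoopA_exit (f : Nat) (lst : List Int) (j a : Int) (hf : 1 ≤ f)
    (h : (lst.length : Int) - 3 ≤ j) : pvLoopA f lst j a = some a := by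
  obtain ⟨f', rfl⟩ : ∃ f', f = f' + 1 := ⟨f - 1, by omega⟩
  rw [pvLoopA, if_neg (by omega)]

-- a step of A's loop that finds no burger at a nonnegative index
theorem pvLoopA_skip (f : Nat) (lst : List Int) (n : Nat) (a : Int)
    (h : (n : Int) < (lst.length : Int) - 3)
    (hm : (lst.drop n).take 4 ≠ [1, 2, 3, 1]) :
    pvLoopA (f + 1) lst (n : Int) a = pvLoopA f lst ((n : Int) + 1) a := by
  rw [pvLoopA, if_pos h]
  have hg : PySem.List.pyGet? lst (n : Int) = some (lst[n]'(by omega)) := by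
    simp [PySem.List.pyGet?_natCast, List.getElem?_eq_getElem (by omega : n < lst.length)]
  simp only [hg]
  have hsl : PySem.List.slice lst (some (n : Int)) (some ((n : Int) + 4)) = (lst.drop n).take 4 := by
    have := PySem.List.slice_natCast_add (xs := lst) (j := n) (n := 4)
    simpa using this
  simp only [hsl]
  by_cases hx : lst[n]'(by omega) = (1 : Int)
  · rw [if_pos hx, if_neg hm]
  · rw [if_neg hx]

-- a step of A's loop that finds a burger at a nonnegative index
theorem pvLoopA_match (f : Nat) (lst : List Int) (n : Nat) (a : Int)
    (h : (n : Int) < (lst.length : Int) - 3)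
    (hm : (lst.drop n).take 4 = [1, 2, 3, 1]) :
    pvLoopA (f + 1) lst (n : Int) a =
      pvLoopA f (lst.take n ++ lst.drop (n + 4)) ((n : Int) - 3) (a + 1) := by
  have hn : n + 4 ≤ lst.length := by
    have : (n : Int) + 3 < (lst.length : Int) := by omega
    exact_mod_cast this
  rw [pvLoopA, if_pos h]
  have hg : PySem.List.pyGet? lst (n : Int) = some (lst[n]'(by omega)) := by
    simp [PySem.List.pyGet?_natCast, List.getElem?_eq_getElem (by omega : n < lst.length)]
  simp only [hg]
  have hsl : PySem.List.slice lst (some (n : Int)) (some ((n : Int) + 4)) = (lst.drop n).take 4 := by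
    have := PySem.List.slice_natCast_add (xs := lst) (j := n) (n := 4)
    simpa using this
  have hx : lst[n]'(by omega) = (1 : Int) := by
    have h0 : ((lst.drop n).take 4)[0]'(by rw [hm]; simp) = 1 := by simp [hm]
    simpa [List.getElem_take, List.getElem_drop] using h0
  rw [if_pos hx]
  simp only [hsl]
  rw [if_pos hm]
  have hdel : pvDelSlice lst (n : Int) ((n : Int) + 4) = lst.take n ++ lst.drop (n + 4) := by
    have h4 : ((n : Int) + 4) = ((n + 4 : Nat) : Int) := by push_cast; ring
    rw [pvDelSlice, h4]
    rw [PySem.List.clampIdx_natCast, PySem.List.clampIdx_natCast]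
    have e1 : min (n : Nat) lst.length = n := by omega
    have e2 : min (n + 4 : Nat) lst.length = n + 4 := by omega
    rw [e1, e2]
    have e3 : max n (n + 4) = n + 4 := by omega
    rw [e3]
  rw [hdel]

-- at a negative index with enough elements, A's loop just moves on: the slice is too short to match
theorem pvLoopA_neg_step (f : Nat) (lst : List Int) (j : Int) (a : Int) (hj : -3 ≤ j)
    (hj2 : j ≤ -1) (hc : j < (lst.length : Int) - 3) (hacc : -j ≤ (lst.length : Int)) :
    pvLoopA (f + 1) lst j a = pvLoopA f lst (j + 1) a := by
  rw [pvLoopA, if_pos hc]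
  have hk1 : 0 < (-j).toNat := by omega
  have hk2 : (-j).toNat ≤ lst.length := by omega
  have hjk : j = -(((-j).toNat : Nat) : Int) := by omega
  have hg : PySem.List.pyGet? lst j = some (lst[(lst.length - (-j).toNat)]'(by omega)) := by
    conv_lhs => rw [hjk]
    rw [PySem.List.pyGet?_neg_natCast lst _ hk1 hk2]
    rw [List.getElem?_eq_getElem (by omega)]
  simp only [hg]
  by_cases hx : (lst[(lst.length - (-j).toNat)]'(by omega)) = (1 : Int)
  · rw [if_pos hx]
    have hns : PySem.List.slice lst (some j) (some (j + 4)) ≠ [1, 2, 3, 1] := by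
      intro he
      have := congrArg List.length he
      rw [PySem.List.length_slice] at this
      simp only [PySem.List.clampIdx, List.length_cons, List.length_nil] at this
      split_ifs at this <;> omega
    rw [if_neg hns]
  · rw [if_neg hx]

-- the IndexError: negative index -3 into a list of 1-2 leftover items
theorem pvLoopA_crash (f : Nat) (lst : List Int) (a : Int) (h1 : 1 ≤ lst.length)
    (h2 : lst.length ≤ 2) : pvLoopA (f + 1) lst (-3) a = none := by
  rw [pvLoopA, if_pos (by omega)]
  have hg : PySem.List.pyGet? lst (-3) = none := by
    rw [PySem.List.pyGet?_eq_none_iff, PySem.Raise.InRange]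
    omega
  simp only [hg]

theorem pvSmallRun (ys : List Int) : ∀ (st : List Int) (c : Int),
    st.length + ys.length ≤ 3 → pvLoopB st c ys = c := by
  induction ys with
  | nil => intro st c _; rfl
  | cons x ys ih =>
    intro st c h
    simp only [List.length_cons] at h
    have hne : (x :: st).take 4 ≠ [1, 3, 2, 1] := by
      intro he
      have := congrArg List.length he
      simp at this
      omega
    simp only [pvLoopB, if_neg hne]
    exact ih _ _ (by simp; omega)

theorem pvSmallPush (p : List Int) : ∀ (st rest : List Int) (c : Int),
    st.length + p.length ≤ 3 → pvLoopB st c (p ++ rest) = pvLoopB (p.reverse ++ st) c rest := by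
  induction p with
  | nil => intro st rest c _; simp
  | cons x p ih =>
    intro st rest c h
    simp only [List.length_cons] at h
    have hne : (x :: st).take 4 ≠ [1, 3, 2, 1] := by
      intro he
      have := congrArg List.length he
      simp at this
      omega
    simp only [List.cons_append, pvLoopB, if_neg hne]
    rw [ih _ _ _ (by simp; omega)]
    simp

theorem pvSmallRed (v : List Int) : ∀ (st : List Int),
    st.length + v.length ≤ 3 → v.foldl pvStep st = v.reverse ++ st := by
  induction v with
  | nil => intro st _; simp
  | cons x v ih =>
    intro st h
    simp only [List.length_cons] at h
    have hne : (x :: st).take 4 ≠ [1, 3, 2, 1] := by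
      intro he
      have := congrArg List.length he
      simp at this
      omega
    simp only [List.foldl_cons, pvStep, if_neg hne]
    rw [ih _ (by simp; omega)]
    simp

theorem pvRevTake (lst : List Int) (n : Nat) (h : n + 4 ≤ lst.length) :
    ((lst.take (n + 4)).reverse).take 4 = ((lst.drop n).take 4).reverse := by
  rw [List.take_add, List.reverse_append]
  rw [List.take_left' (by simp; omega)]

theorem pvRevDrop (lst : List Int) (n : Nat) (h : n + 4 ≤ lst.length) :
    ((lst.take (n + 4)).reverse).drop 4 = (lst.take n).reverse := by
  rw [List.take_add, List.reverse_append]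
  rw [List.drop_left' (by simp; omega)]

-- chain of negative-index steps back up to index 0
theorem pvNegChain (lst : List Int) (a : Int) : ∀ (m : Nat), m ≤ 3 → 3 ≤ lst.length →
    ∀ (f : Nat), pvLoopA (f + m) lst (-(m : Int)) a = pvLoopA f lst 0 a := by
  intro m
  induction m with
  | zero => intro _ _ f; norm_num
  | succ m ih =>
    intro hm hlen f
    have h1 : pvLoopA ((f + m) + 1) lst (-((m + 1 : Nat) : Int)) a
        = pvLoopA (f + m) lst (-((m + 1 : Nat) : Int) + 1) a := by
      apply pvLoopA_neg_step <;> omega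
    have h2 : (-((m + 1 : Nat) : Int) + 1) = -((m : Nat) : Int) := by push_cast; ring
    rw [show f + (m + 1) = (f + m) + 1 from by omega, h1, h2, ih (by omega) hlen f]

-- the simulation invariant: A's state (lst, n, k) mirrors B having consumed n+3+4k of the original
-- input w, with stack (lst.take (n+3)).reverse; either A finishes and equals B's continuation, or A
-- crashes and w satisfies Raises_solution
theorem pvMain (w : List Int) : ∀ (μ : Nat) (n k : Nat) (lst : List Int),
    1 ≤ μ →
    2 * lst.length + 4 ≤ μ + n →
    lst.drop (n + 3) = w.drop (n + 3 + 4 * k) →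
    pvRed (w.take (n + 3 + 4 * k)) = (lst.take (n + 3)).reverse →
    pvLoopA μ lst (n : Int) (k : Int) =
        some (pvLoopB ((lst.take (n + 3)).reverse) (k : Int) (lst.drop (n + 3)))
      ∨ (pvLoopA μ lst (n : Int) (k : Int) = none ∧ Raises_solution w) := by
  intro μ
  induction μ using Nat.strong_induction_on with
  | _ μ ih =>
    intro n k lst hfuel hmu hC1 hC2
    obtain ⟨μ, rfl⟩ : ∃ m, μ = m + 1 := ⟨μ - 1, by omega⟩
    by_cases hlt : (n : Int) < (lst.length : Int) - 3
    case neg =>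
      left
      rw [pvLoopA_exit (μ + 1) lst _ _ (by omega) (by omega)]
      rw [List.drop_eq_nil_of_le (by omega : lst.length ≤ n + 3)]
      rfl
    case pos =>
    have hn4 : n + 4 ≤ lst.length := by omega
    have hn3lt : n + 3 < lst.length := by omega
    have hdropcons : lst.drop (n + 3) = lst[n + 3]'(hn3lt) :: lst.drop (n + 4) := by
      rw [List.drop_eq_getElem_cons hn3lt]
    have hwdrop4 : w.drop (n + 4 + 4 * k) = lst.drop (n + 4) := by
      have h := congrArg (List.drop 1) hC1
      rw [List.drop_drop, List.drop_drop] at h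
      have e1 : n + 3 + 1 = n + 4 := by omega
      have e2 : n + 3 + 4 * k + 1 = n + 4 + 4 * k := by omega
      rw [e1, e2] at h
      exact h.symm
    have hstack : lst[n + 3]'(hn3lt) :: (lst.take (n + 3)).reverse = (lst.take (n + 4)).reverse := by
      have : lst.take (n + 4) = lst.take (n + 3) ++ [lst[n + 3]'(hn3lt)] := by
        rw [show n + 4 = (n + 3) + 1 from rfl, List.take_add_one,
          List.getElem?_eq_getElem hn3lt]
        rfl
      rw [this, List.reverse_append]
      rfl
    have hwtake4 : w.take (n + 4 + 4 * k) = w.take (n + 3 + 4 * k) ++ [lst[n + 3]'(hn3lt)] := by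
      rw [show n + 4 + 4 * k = (n + 3 + 4 * k) + 1 from by omega, List.take_add, ← hC1, hdropcons]
      rfl
    have hred_step : pvRed (w.take (n + 4 + 4 * k))
        = pvStep ((lst.take (n + 3)).reverse) (lst[n + 3]'(hn3lt)) := by
      rw [hwtake4, pvRed, List.foldl_append]
      rw [show ([lst[n + 3]'(hn3lt)].foldl pvStep (List.foldl pvStep [] (w.take (n + 3 + 4 * k))))
          = pvStep (pvRed (w.take (n + 3 + 4 * k))) (lst[n + 3]'(hn3lt)) from rfl]
      rw [hC2]
    by_cases hm : (lst.drop n).take 4 = [1, 2, 3, 1]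
    · -- burger found at index n
      have hstep := pvLoopA_match μ lst n (k : Int) hlt hm
      have hcond : ((lst.take (n + 4)).reverse).take 4 = [1, 3, 2, 1] := by
        rw [pvRevTake lst n hn4, hm]
        rfl
      have htake' : (lst.take n ++ lst.drop (n + 4)).take n = lst.take n := by
        rw [List.take_left' (by simp; omega)]
      have hdrop' : (lst.take n ++ lst.drop (n + 4)).drop n = lst.drop (n + 4) := by
        rw [List.drop_left' (by simp; omega)]
      have hlen' : (lst.take n ++ lst.drop (n + 4)).length = lst.length - 4 := by
        simp
        omega
      have hBpop : pvLoopB ((lst.take (n + 3)).reverse) (k : Int) (lst.drop (n + 3))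
          = pvLoopB ((lst.take n).reverse) ((k : Int) + 1) (lst.drop (n + 4)) := by
        rw [hdropcons]
        simp only [pvLoopB]
        rw [hstack, if_pos hcond, pvRevDrop lst n hn4]
      have hred4 : pvRed (w.take (n + 4 + 4 * k)) = (lst.take n).reverse := by
        rw [hred_step, pvStep]
        simp only [hstack]
        rw [if_pos hcond, pvRevDrop lst n hn4]
      by_cases hn3 : 3 ≤ n
      · -- burger removed at index ≥ 3: A continues at n-3
        have hcast : ((n : Int) - 3) = ((n - 3 : Nat) : Int) := by omega
        have hC1' : (lst.take n ++ lst.drop (n + 4)).drop ((n - 3) + 3)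
            = w.drop ((n - 3) + 3 + 4 * (k + 1)) := by
          rw [show (n - 3) + 3 + 4 * (k + 1) = n + 4 + 4 * k from by omega,
            show (n - 3) + 3 = n from by omega, hdrop', hwdrop4]
        have hC2' : pvRed (w.take ((n - 3) + 3 + 4 * (k + 1)))
            = ((lst.take n ++ lst.drop (n + 4)).take ((n - 3) + 3)).reverse := by
          rw [show (n - 3) + 3 + 4 * (k + 1) = n + 4 + 4 * k from by omega, hred4,
            show (n - 3) + 3 = n from by omega, htake']
        have hmu' : 2 * (lst.take n ++ lst.drop (n + 4)).length + 4 ≤ μ + (n - 3) := by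
          rw [hlen']; omega
        rcases ih μ (by omega) (n - 3) (k + 1) _ (by omega) hmu' hC1' hC2' with h | ⟨hnone, hr⟩
        · left
          rw [hstep, hcast, show ((k : Int) + 1) = ((k + 1 : Nat) : Int) from by push_cast; ring, h,
            hBpop]
          rw [show (n - 3) + 3 = n from by omega, htake', hdrop']
          push_cast
          rfl
        · right
          refine ⟨?_, hr⟩
          rw [hstep, hcast, show ((k : Int) + 1) = ((k + 1 : Nat) : Int) from by push_cast; ring]
          exact hnone
      · -- burger removed at index n < 3: A backs into negative indices
        replace hn3 : n < 3 := by omega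
        by_cases hbig : 3 ≤ lst.length - 4
        · -- enough items left: A walks back up to index 0; use the IH there
          have hchain : pvLoopA μ (lst.take n ++ lst.drop (n + 4)) ((n : Int) - 3) ((k : Int) + 1)
              = pvLoopA (μ - (3 - n)) (lst.take n ++ lst.drop (n + 4)) 0 ((k : Int) + 1) := by
            have hch := pvNegChain (lst.take n ++ lst.drop (n + 4)) ((k : Int) + 1) (3 - n)
              (by omega) (by rw [hlen']; omega) (μ - (3 - n))
            rw [show (μ - (3 - n)) + (3 - n) = μ from by omega,
              show -(((3 - n : Nat)) : Int) = (n : Int) - 3 from by omega] at hch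
            exact hch
          have hvsplit : lst.drop (n + 4)
              = (lst.drop (n + 4)).take (3 - n) ++ lst.drop 7 := by
            have hsp := List.take_append_drop (3 - n) (lst.drop (n + 4))
            rw [List.drop_drop, show (n + 4) + (3 - n) = 7 from by omega] at hsp
            exact hsp.symm
          have htk3 : (lst.take n ++ lst.drop (n + 4)).take (0 + 3)
              = lst.take n ++ (lst.drop (n + 4)).take (3 - n) := by
            rw [show (0 + 3 : Nat) = n + (3 - n) from by omega, List.take_add, htake', hdrop']
          have hdr3 : (lst.take n ++ lst.drop (n + 4)).drop (0 + 3) = lst.drop 7 := by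
            rw [show (0 + 3 : Nat) = n + (3 - n) from by omega, ← List.drop_drop, hdrop',
              List.drop_drop, show (n + 4) + (3 - n) = 7 from by omega]
          have hC1'' : (lst.take n ++ lst.drop (n + 4)).drop (0 + 3)
              = w.drop (0 + 3 + 4 * (k + 1)) := by
            rw [hdr3, show (0 + 3 + 4 * (k + 1) : Nat) = (n + 4 + 4 * k) + (3 - n) from by omega,
              ← List.drop_drop, hwdrop4, List.drop_drop,
              show (n + 4) + (3 - n) = 7 from by omega]
          have hC2'' : pvRed (w.take (0 + 3 + 4 * (k + 1)))
              = ((lst.take n ++ lst.drop (n + 4)).take (0 + 3)).reverse := by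
            rw [show (0 + 3 + 4 * (k + 1) : Nat) = (n + 4 + 4 * k) + (3 - n) from by omega,
              List.take_add, pvRed, List.foldl_append]
            rw [show List.foldl pvStep [] (w.take (n + 4 + 4 * k)) = pvRed (w.take (n + 4 + 4 * k))
              from rfl, hred4, hwdrop4]
            rw [pvSmallRed _ _ (by simp; omega)]
            rw [htk3, List.reverse_append]
          have hBsmall : pvLoopB ((lst.take n).reverse) ((k : Int) + 1) (lst.drop (n + 4))
              = pvLoopB (((lst.take n ++ lst.drop (n + 4)).take (0 + 3)).reverse) ((k : Int) + 1)
                  ((lst.take n ++ lst.drop (n + 4)).drop (0 + 3)) := by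
            conv_lhs => rw [hvsplit]
            rw [pvSmallPush _ _ _ _ (by simp; omega)]
            rw [htk3, hdr3, List.reverse_append]
          rcases ih (μ - (3 - n)) (by omega) 0 (k + 1) (lst.take n ++ lst.drop (n + 4))
              (by omega) (by rw [hlen']; omega) hC1'' hC2'' with h | ⟨hnone, hr⟩
          · left
            rw [hstep, hchain,
              show ((k : Int) + 1) = ((k + 1 : Nat) : Int) from by push_cast; ring,
              show (0 : Int) = ((0 : Nat) : Int) from by norm_num, h]
            rw [hBpop, hBsmall,
              show ((k : Int) + 1) = ((k + 1 : Nat) : Int) from by push_cast; ring]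
          · right
            refine ⟨?_, hr⟩
            rw [hstep, hchain,
              show ((k : Int) + 1) = ((k + 1 : Nat) : Int) from by push_cast; ring,
              show (0 : Int) = ((0 : Nat) : Int) from by norm_num]
            exact hnone
        · -- at most 2 items left after the removal
          have hlen'' := hlen'
          by_cases hcr : n = 0 ∧ 1 ≤ lst.length - 4
          · -- A deletes a leading burger leaving 1-2 items: IndexError
            obtain ⟨hn0, hge⟩ := hcr
            subst hn0
            right
            constructor
            · rw [hstep, show ((0 : Nat) : Int) - 3 = -3 from by norm_num]
              obtain ⟨f, rfl⟩ : ∃ f, μ = f + 1 := ⟨μ - 1, by omega⟩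
              exact pvLoopA_crash f _ _ (by omega) (by omega)
            · have hlw := congrArg List.length hC1
              simp only [List.length_drop] at hlw
              have hwlen : w.length = 4 * k + lst.length := by omega
              refine ⟨by omega, by omega, ?_⟩
              have hidx : w.length - w.length % 4 = 0 + 4 + 4 * k := by omega
              rw [hidx]
              simpa using hred4
          · -- A runs its index back up and exits without reading anything
            have hA : pvLoopA μ (lst.take n ++ lst.drop (n + 4)) ((n : Int) - 3) ((k : Int) + 1)
                = some ((k : Int) + 1) := by
              interval_cases n
              · exact pvLoopA_exit μ _ _ _ (by omega) (by omega)
              · rcases (by omega : lst.length - 4 = 1 ∨ lst.length - 4 = 2) with hL | hL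
                · exact pvLoopA_exit μ _ _ _ (by omega) (by omega)
                · obtain ⟨f, rfl⟩ : ∃ f, μ = f + 1 := ⟨μ - 1, by omega⟩
                  rw [pvLoopA_neg_step f _ _ _ (by norm_num) (by norm_num) (by omega) (by omega)]
                  exact pvLoopA_exit f _ _ _ (by omega) (by omega)
              · exact pvLoopA_exit μ _ _ _ (by omega) (by omega)
            left
            rw [hstep, hA, hBpop, pvSmallRun _ _ _ (by simp; omega)]
    · -- no burger at index n
      have hstep := pvLoopA_skip μ lst n (k : Int) hlt hm
      have hcond : ((lst.take (n + 4)).reverse).take 4 ≠ [1, 3, 2, 1] := by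
        rw [pvRevTake lst n hn4]
        intro he
        apply hm
        have := congrArg List.reverse he
        simpa using this
      have hC1' : lst.drop ((n + 1) + 3) = w.drop ((n + 1) + 3 + 4 * k) := by
        rw [show (n + 1) + 3 = n + 4 from by omega,
          show (n + 1) + 3 + 4 * k = n + 4 + 4 * k from by omega, hwdrop4]
      have hC2' : pvRed (w.take ((n + 1) + 3 + 4 * k)) = (lst.take ((n + 1) + 3)).reverse := by
        rw [show (n + 1) + 3 + 4 * k = n + 4 + 4 * k from by omega, hred_step, pvStep]
        simp only [hstack]
        rw [if_neg hcond, show (n + 1) + 3 = n + 4 from by omega]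
      have hBskip : pvLoopB ((lst.take (n + 3)).reverse) (k : Int) (lst.drop (n + 3))
          = pvLoopB ((lst.take (n + 4)).reverse) (k : Int) (lst.drop (n + 4)) := by
        rw [hdropcons]
        simp only [pvLoopB]
        rw [hstack, if_neg hcond]
      rcases ih μ (by omega) (n + 1) k lst (by omega) (by omega) hC1' hC2' with h | ⟨hnone, hr⟩
      · left
        rw [hstep, show ((n : Int) + 1) = ((n + 1 : Nat) : Int) from by push_cast; ring, h, hBskip]
      · right
        refine ⟨?_, hr⟩
        rw [hstep, show ((n : Int) + 1) = ((n + 1 : Nat) : Int) from by push_cast; ring]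
        exact hnone

-- ===== VERDICT (by name: the statement is the Claim_ definition above) =====
theorem solution_spec : Claim_equal_solution := by
  intro w _ hpre
  unfold Spec_solution solution solution_alt
  have hC1 : w.drop (0 + 3) = w.drop (0 + 3 + 4 * 0) := by norm_num
  have hC2 : pvRed (w.take (0 + 3 + 4 * 0)) = (w.take (0 + 3)).reverse := by
    have := pvSmallRed (w.take 3) [] (by simp)
    simpa [pvRed] using this
  have hmain := pvMain w (2 * w.length + 4) 0 0 w (by omega) (by omega) hC1 hC2
  rcases hmain with h | ⟨_, hraise⟩
  · have hB : pvLoopB [] 0 w = pvLoopB ((w.take 3).reverse) 0 (w.drop 3) := by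
      have := pvSmallPush (w.take 3) [] (w.drop 3) 0 (by simp)
      simpa using this
    norm_num at h
    rw [h, hB]
    rfl
  · exact absurd hraise hpre

theorem solution_raises : Claim_raises_solution := by
  unfold Claim_raises_solution
  exact ⟨fun w _ hr hp => hp hr, by decide⟩

-- self-check: by solution_raises, the crash witness indeed falls outside Pre_solution
theorem pvRaiseWitness_ok : ¬ Pre_solution pvRaiseWitness_solution :=
  solution_raises.1 pvRaiseWitness_solution (by decide) (by decide)
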